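-- pv_equiv track=rewrite | github.com/DonaldPG/PyTAAA | remove_duplicates.py | find_function_ranges
-- ===== SOURCE A (Python) =====
-- def find_function_ranges(lines):
--     """Find start and end line numbers for each function definition.
--
--     Returns:
--         list: List of (function_name, start_line, end_line) tuples
--     """
--     func_list = []
--     current_func = None
--     func_start = None
--     indent_level = None
--
--     for i, line in enumerate(lines):
--         # Check if this is a function definition
--         if line.startswith('def '):
--             # If we were tracking a previous function, save its end
--             if current_func is not None:
--                 func_list.append((current_func, func_start, i - 1))
--
--             # Start tracking new function
--             func_name = line.split('(')[0].replace('def ', '').strip()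
--             current_func = func_name
--             func_start = i
--             indent_level = 0
--
--         # Check if we're at top level again (new function or class)
--         elif current_func and line and not line[0].isspace() and line.strip():
--             if line.startswith('def ') or line.startswith('class ') or line.startswith('#---'):
--                 # Previous function ended
--                 func_list.append((current_func, func_start, i - 1))
--                 current_func = None
--                 func_start = None
--
--     # Handle last function
--     if current_func is not None:
--         func_list.append((current_func, func_start, len(lines) - 1))
--
--     return func_list
-- ===== SOURCE B (Python) =====
-- def find_function_ranges(lines):
--     """Find start and end line numbers for each function definition.
--
--     Gather-then-pair: one pass records every top-level boundary line
--     (a 'def ' start with its name, or a 'class '/'#---' terminator);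
--     then each def's end is the line before the next boundary, or the
--     last line if none follows.
--     """
--     bounds = []
--     for i, line in enumerate(lines):
--         if line.startswith('def '):
--             bounds.append((i, line.split('(')[0].replace('def ', '').strip()))
--         elif line.startswith('class ') or line.startswith('#---'):
--             bounds.append((i, None))
--     result = []
--     for k, (i, name) in enumerate(bounds):
--         if name is not None:
--             end = bounds[k + 1][0] - 1 if k + 1 < len(bounds) else len(lines) - 1
--             result.append((name, i, end))
--     return result
-- ===== Notes on version B (the rewrite author's own statement) =====
-- stated objective: alternative
-- what changed: Replaces A's running current-function state machine with a gather-then-pair scheme: one pass collects boundary records (def starts with their names, class/#--- terminators), a second pass pairs each def with the next boundary (or end of file) to get its end line.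
-- intended difference: On inputs where a 'def ' line with an empty extracted name (e.g. 'def (x):') is followed by a top-level class/#--- terminator before any further def, A's truthiness test 'current_func and ...' skips the terminator and extends that function to the next def or EOF, while B ends it at the line before the terminator like every other function, which is the intended boundary rule. — e.g. on find_function_ranges(["def (x):", "class X:"]): A returns [("", 0, 1)], B returns [("", 0, 0)]
import Mathlib
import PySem

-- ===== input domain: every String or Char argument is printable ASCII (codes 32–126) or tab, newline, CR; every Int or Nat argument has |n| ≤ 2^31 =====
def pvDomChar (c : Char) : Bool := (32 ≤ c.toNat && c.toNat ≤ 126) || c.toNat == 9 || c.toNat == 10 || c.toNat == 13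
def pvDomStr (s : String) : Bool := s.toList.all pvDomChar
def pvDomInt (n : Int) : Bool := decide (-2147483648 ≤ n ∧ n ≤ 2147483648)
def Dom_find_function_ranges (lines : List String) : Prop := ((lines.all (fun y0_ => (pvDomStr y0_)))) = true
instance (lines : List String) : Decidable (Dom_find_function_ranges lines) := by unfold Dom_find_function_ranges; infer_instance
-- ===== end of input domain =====

-- B replaces A's running current-function state machine with a gather-then-pair pass
-- (collect boundary lines, then pair each def with the next boundary); objective: alternative decomposition, same cost.

-- ===== PORT A =====
-- name extraction, shared by both Pythons verbatim: line.split('(')[0].replace('def ', '').strip()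
def pvExtractName (line : String) : String :=
  PySem.Str.strip (PySem.Str.replace (((PySem.Str.split? line "(").getD []).headD "") "def " "")

-- the for-loop of A: state (func_list, current_func/func_start bundled as an Option), i the enumerate index
def ffrLoopA (acc : List (String × Int × Int)) (cur : Option (String × Int)) (i : Int) :
    List String → (List (String × Int × Int) × Option (String × Int))
  | [] => (acc, cur)
  | line :: rest =>
    if PySem.Str.startswith line "def " then
      let acc' := match cur with
        | some (n, s) => acc ++ [(n, s, i - 1)]
        | none => acc
      ffrLoopA acc' (some (pvExtractName line, i)) (i + 1) rest
    else
      match cur with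
      | some (n, s) =>
        -- elif current_func and line and not line[0].isspace() and line.strip():
        if (n != "") && (line != "") && !((PySem.Str.pyGet? line 0).getD ' ' |> PySem.Chars.isspace)
            && (PySem.Str.strip line != "") then
          if PySem.Str.startswith line "def " || PySem.Str.startswith line "class "
              || PySem.Str.startswith line "#---" then
            ffrLoopA (acc ++ [(n, s, i - 1)]) none (i + 1) rest
          else
            ffrLoopA acc (some (n, s)) (i + 1) rest
        else
          ffrLoopA acc (some (n, s)) (i + 1) rest
      | none => ffrLoopA acc none (i + 1) rest

def find_function_ranges (lines : List String) : List (String × Int × Int) :=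
  match ffrLoopA [] none 0 lines with
  | (func_list, some (n, s)) => func_list ++ [(n, s, PySem.List.len lines - 1)]
  | (func_list, none) => func_list

-- ===== PORT B =====
-- pass 1 of B: the boundary records, (line index, some name) for a 'def ' line, (line index, none) for a terminator
def ffrBounds (i : Int) : List String → List (Int × Option String)
  | [] => []
  | line :: rest =>
    if PySem.Str.startswith line "def " then
      (i, some (pvExtractName line)) :: ffrBounds (i + 1) rest
    else if PySem.Str.startswith line "class " || PySem.Str.startswith line "#---" then
      (i, none) :: ffrBounds (i + 1) rest
    else
      ffrBounds (i + 1) rest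

-- pass 2 of B: each def runs to the line before the next boundary (head of the rest), or to the last line
def ffrPair (n : Int) : List (Int × Option String) → List (String × Int × Int)
  | [] => []
  | (i, o) :: rest =>
    match o with
    | some nm => (nm, i, (match rest with | [] => n - 1 | (j, _) :: _ => j - 1)) :: ffrPair n rest
    | none => ffrPair n rest

def find_function_ranges_alt (lines : List String) : List (String × Int × Int) :=
  ffrPair (PySem.List.len lines) (ffrBounds 0 lines)

-- ===== PRECONDITION & SPEC =====
-- helpers for D_: a 'def ' line whose extracted name is empty, and "a class/#--- terminator occurs before the next def"
def ffrEmptyDef (line : String) : Bool :=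
  PySem.Str.startswith line "def " && pvExtractName line == ""

def ffrTermBeforeDef : List String → Bool
  | [] => false
  | l :: rest =>
    if PySem.Str.startswith l "class " || PySem.Str.startswith l "#---" then true
    else if PySem.Str.startswith l "def " then false
    else ffrTermBeforeDef rest

def ffrHasBad : List String → Bool
  | [] => false
  | l :: rest => (ffrEmptyDef l && ffrTermBeforeDef rest) || ffrHasBad rest

-- On inputs with a 'def ' line whose extracted name is empty ('def (x):') followed by a top-level
-- 'class '/'#---' terminator before any further def, A's truthiness test `current_func and …` skips the
-- terminator and extends that function past it (to the next def or EOF), while B ends it at the line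
-- before the terminator like every other function — the intended boundary rule.
def D_find_function_ranges (lines : List String) : Prop := ffrHasBad lines = true
instance (lines : List String) : Decidable (D_find_function_ranges lines) := by
  unfold D_find_function_ranges; infer_instance

def Spec_find_function_ranges (lines : List String) (out : List (String × Int × Int)) : Prop :=
  ¬ D_find_function_ranges lines → out = find_function_ranges_alt lines
instance (lines : List String) (out : List (String × Int × Int)) : Decidable (Spec_find_function_ranges lines out) := by
  unfold Spec_find_function_ranges; infer_instance

def pvDiffWitness_find_function_ranges : List String := ["def (x):", "class X:"]
def pvDiffWitnessOut_find_function_ranges : (List (String × Int × Int)) × (List (String × Int × Int)) :=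
  ([("", 0, 1)], [("", 0, 0)])

-- ===== CLAIM (what is proved, stated in full; the proofs are below) =====
def Claim_unchanged_find_function_ranges : Prop := ∀ (lines : List String), Dom_find_function_ranges lines → Spec_find_function_ranges lines (find_function_ranges lines)
def Claim_exact_find_function_ranges : Prop := ∀ (lines : List String), Dom_find_function_ranges lines → D_find_function_ranges lines → find_function_ranges lines ≠ find_function_ranges_alt lines
def Claim_changed_find_function_ranges : Prop := Dom_find_function_ranges (pvDiffWitness_find_function_ranges) ∧ D_find_function_ranges (pvDiffWitness_find_function_ranges) ∧ find_function_ranges (pvDiffWitness_find_function_ranges) = pvDiffWitnessOut_find_function_ranges.1 ∧ find_function_ranges_alt (pvDiffWitness_find_function_ranges) = pvDiffWitnessOut_find_function_ranges.2 ∧ pvDiffWitnessOut_find_function_ranges.1 ≠ pvDiffWitnessOut_find_function_ranges.2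

-- ===== LEMMAS AND PROOFS =====
-- proof-side shapes: the tail of A's loop written against B's boundary list
def pvEndOf (n : Int) : List (Int × Option String) → Int
  | [] => n - 1
  | (j, _) :: _ => j - 1

def pvFinish (n : Int) (st : List (String × Int × Int) × Option (String × Int)) : List (String × Int × Int) :=
  match st.2 with
  | some (nm, s) => st.1 ++ [(nm, s, n - 1)]
  | none => st.1

def pvPairAux (cur : Option (String × Int)) (n : Int) (bs : List (Int × Option String)) : List (String × Int × Int) :=
  match cur with
  | none => ffrPair n bs
  | some (nm, s) => (nm, s, pvEndOf n bs) :: ffrPair n bs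

lemma ffrPair_cons_some (n i : Int) (nm : String) (rest : List (Int × Option String)) :
    ffrPair n ((i, some nm) :: rest) = (nm, i, pvEndOf n rest) :: ffrPair n rest := by
  cases rest <;> rfl

-- a line starting with a non-space printable keyword is truthy, has non-space first char and truthy strip
lemma strip_ne_of_head_not_space (line : String) (c : Char) (cs : List Char)
    (h : line.toList = c :: cs) (hc : PySem.Chars.isspace c = false) :
    PySem.Str.strip line ≠ "" := by
  intro hcontra
  have h1 : PySem.Chars.strip (c :: cs) = [] := by
    have h2 := congrArg String.toList hcontra
    rw [PySem.Str.toList_strip, h] at h2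
    simpa using h2
  rw [PySem.Chars.strip] at h1
  have hl : PySem.Chars.lstrip (c :: cs) = c :: cs := by
    simp [PySem.Chars.lstrip, hc]
  rw [hl, PySem.Chars.rstrip, List.reverse_eq_nil_iff, List.dropWhile_eq_nil_iff] at h1
  exact absurd (h1 c (by simp)) (by simp [hc])

lemma head_of_startswith (line p : String) (c : Char) (t : List Char)
    (hp : p.toList = c :: t) (hs : PySem.Str.startswith line p = true) :
    ∃ u, line.toList = c :: u := by
  rw [PySem.Str.startswith_eq] at hs
  obtain ⟨u, hu⟩ := (PySem.Chars.startswith_iff _ _).mp hs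
  exact ⟨t ++ u, by rw [← hu, hp]; simp⟩

lemma cond_parts (line : String) (c : Char) (u : List Char)
    (h : line.toList = c :: u) (hc : PySem.Chars.isspace c = false) :
    (line != "") = true ∧ PySem.Str.pyGet? line 0 = some c ∧ (PySem.Str.strip line != "") = true := by
  refine ⟨?_, ?_, ?_⟩
  · simp only [bne_iff_ne, ne_eq]
    intro h0
    rw [h0] at h
    simp at h
  · simp [pysem, h]
  · simpa using strip_ne_of_head_not_space line c u h hc

lemma main_loop (ls : List String) : ∀ (i : Int) (acc : List (String × Int × Int)) (cur : Option (String × Int)),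
    ffrHasBad ls = false →
    (cur.elim True (fun p => p.1 = "" → ffrTermBeforeDef ls = false)) →
    pvFinish (i + ls.length) (ffrLoopA acc cur i ls) = acc ++ pvPairAux cur (i + ls.length) (ffrBounds i ls) := by
  induction ls with
  | nil =>
    intro i acc cur _ _
    cases cur with
    | none => simp [ffrLoopA, pvFinish, pvPairAux, ffrBounds, ffrPair]
    | some p =>
      rcases p with ⟨nm, s⟩
      simp [ffrLoopA, pvFinish, pvPairAux, ffrBounds, ffrPair, pvEndOf]
  | cons line rest ih =>
    intro i acc cur hBad hCur
    simp only [ffrHasBad, Bool.or_eq_false_iff, Bool.and_eq_false_iff] at hBad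
    have hBadRest : ffrHasBad rest = false := hBad.2
    have hn : i + ((line :: rest).length : Int) = (i + 1) + (rest.length : Int) := by
      simp only [List.length_cons]
      push_cast
      ring
    rw [hn]
    cases hdef : PySem.Str.startswith line "def " with
    | true =>
      -- a 'def ' line: close cur (if any), start tracking the new function
      have hName : pvExtractName line = "" → ffrTermBeforeDef rest = false := by
        intro h0
        have he : ffrEmptyDef line = true := by
          simp only [ffrEmptyDef, hdef, h0, Bool.true_and, beq_self_eq_true]
        rcases hBad.1 with h1 | h1
        · rw [he] at h1; cases h1
        · exact h1
      have hIH := fun acc' => ih (i + 1) acc' (some (pvExtractName line, i)) hBadRest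
        (fun h0 => hName h0)
      cases cur with
      | none =>
        simp only [ffrLoopA, hdef, if_true]
        rw [hIH acc]
        simp only [ffrBounds, hdef, if_true, pvPairAux, ffrPair_cons_some]
      | some p =>
        rcases p with ⟨nm, s⟩
        simp only [ffrLoopA, hdef, if_true]
        rw [hIH (acc ++ [(nm, s, i - 1)])]
        simp only [ffrBounds, hdef, if_true, pvPairAux, ffrPair_cons_some, pvEndOf,
          List.append_assoc, List.cons_append, List.nil_append]
    | false =>
      cases hterm : (PySem.Str.startswith line "class " || PySem.Str.startswith line "#---") with
      | true =>
        -- a top-level terminator line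
        have hhead : ∃ c u, line.toList = c :: u ∧ PySem.Chars.isspace c = false := by
          rcases Bool.or_eq_true_iff.mp hterm with h1 | h1
          · obtain ⟨u, hu⟩ := head_of_startswith line "class " 'c' "lass ".toList rfl h1
            exact ⟨'c', u, hu, by decide⟩
          · obtain ⟨u, hu⟩ := head_of_startswith line "#---" '#' "---".toList rfl h1
            exact ⟨'#', u, hu, by decide⟩
        obtain ⟨c, u, hcu, hcsp⟩ := hhead
        obtain ⟨hne, hget, hstrip⟩ := cond_parts line c u hcu hcsp
        cases cur with
        | none =>
          simp only [ffrLoopA, hdef, if_false, Bool.false_eq_true]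
          rw [ih (i + 1) acc none hBadRest trivial]
          simp only [ffrBounds, hdef, hterm, if_true, if_false, Bool.false_eq_true,
            pvPairAux, ffrPair]
        | some p =>
          rcases p with ⟨nm, s⟩
          by_cases hnm : nm = ""
          · have hT := hCur hnm
            rw [ffrTermBeforeDef, hterm] at hT
            simp at hT
          · have hcond : ((nm != "") && (line != "")
                && !((PySem.Str.pyGet? line 0).getD ' ' |> PySem.Chars.isspace)
                && (PySem.Str.strip line != "")) = true := by
              simp only [hne, hget, Option.getD_some, hcsp, Bool.not_false, hstrip,
                Bool.and_true]
              exact bne_iff_ne.mpr hnm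
            simp only [ffrLoopA, hdef, hcond, Bool.false_or, hterm, if_true, if_false,
              Bool.false_eq_true]
            rw [ih (i + 1) (acc ++ [(nm, s, i - 1)]) none hBadRest trivial]
            simp only [ffrBounds, hdef, hterm, if_true, if_false, Bool.false_eq_true,
              pvPairAux, ffrPair, pvEndOf, List.append_assoc, List.cons_append, List.nil_append]
      | false =>
        -- an ordinary line: state unchanged in A, no boundary record in B
        have htbd : ffrTermBeforeDef (line :: rest) = ffrTermBeforeDef rest := by
          rw [ffrTermBeforeDef, hterm, hdef]
          simp
        have hb : ffrBounds i (line :: rest) = ffrBounds (i + 1) rest := by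
          rw [ffrBounds, hdef, hterm]
          simp
        rw [hb]
        cases cur with
        | none =>
          simp only [ffrLoopA, hdef, if_false, Bool.false_eq_true]
          exact ih (i + 1) acc none hBadRest trivial
        | some p =>
          rcases p with ⟨nm, s⟩
          have hstep : ffrLoopA acc (some (nm, s)) i (line :: rest)
              = ffrLoopA acc (some (nm, s)) (i + 1) rest := by
            simp only [ffrLoopA, hdef, Bool.false_or, hterm, if_false, Bool.false_eq_true,
              ite_self]
          rw [hstep]
          exact ih (i + 1) acc (some (nm, s)) hBadRest
            (fun h0 => htbd ▸ hCur h0)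


-- ---- tightness: inside D_, A and B differ on every input ----
-- once an empty-named def is the current function and a terminator arrives, A keeps it open: its
-- entry's end is at least the terminator's index, while B closes it one line earlier.
def pvBadHyp (cur : Option (String × Int)) (ls : List String) : Prop :=
  cur.elim (ffrHasBad ls = true) (fun p => ffrHasBad ls = true ∨ (p.1 = "" ∧ ffrTermBeforeDef ls = true))

lemma not_term_of_def (line : String) (hdef : PySem.Str.startswith line "def " = true) :
    (PySem.Str.startswith line "class " || PySem.Str.startswith line "#---") = false := by
  obtain ⟨u, hu⟩ := head_of_startswith line "def " 'd' "ef ".toList rfl hdef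
  cases hcl : PySem.Str.startswith line "class " with
  | true =>
    obtain ⟨v, hv⟩ := head_of_startswith line "class " 'c' "lass ".toList rfl hcl
    rw [hu] at hv
    simp at hv
  | false =>
    cases hha : PySem.Str.startswith line "#---" with
    | true =>
      obtain ⟨v, hv⟩ := head_of_startswith line "#---" '#' "---".toList rfl hha
      rw [hu] at hv
      simp at hv
    | false => simp

lemma loop_appends (ls : List String) : ∀ (n i : Int) (acc : List (String × Int × Int)) (cur : Option (String × Int)),
    ∃ suf, pvFinish n (ffrLoopA acc cur i ls) = acc ++ suf := by
  induction ls with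
  | nil =>
    intro n i acc cur
    cases cur with
    | none => exact ⟨[], by simp [ffrLoopA, pvFinish]⟩
    | some p =>
      rcases p with ⟨nm, s⟩
      exact ⟨[(nm, s, n - 1)], by simp [ffrLoopA, pvFinish]⟩
  | cons line rest ih =>
    intro n i acc cur
    cases cur with
    | none =>
      cases hdef : PySem.Str.startswith line "def " with
      | true =>
        simp only [ffrLoopA, hdef, if_true]
        exact ih n (i + 1) acc _
      | false =>
        simp only [ffrLoopA, hdef, Bool.false_eq_true, if_false]
        exact ih n (i + 1) acc none
    | some p =>
      rcases p with ⟨nm, s⟩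
      cases hdef : PySem.Str.startswith line "def " with
      | true =>
        simp only [ffrLoopA, hdef, if_true]
        obtain ⟨suf, hsuf⟩ := ih n (i + 1) (acc ++ [(nm, s, i - 1)]) (some (pvExtractName line, i))
        exact ⟨(nm, s, i - 1) :: suf, by rw [hsuf]; simp⟩
      | false =>
        cases hcond : ((nm != "") && (line != "")
            && !((PySem.Str.pyGet? line 0).getD ' ' |> PySem.Chars.isspace)
            && (PySem.Str.strip line != "")) with
        | false =>
          simp only [ffrLoopA, hdef, Bool.false_eq_true, if_false, hcond]
          exact ih n (i + 1) acc (some (nm, s))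
        | true =>
          cases hio : (PySem.Str.startswith line "class " || PySem.Str.startswith line "#---") with
          | true =>
            simp only [ffrLoopA, hdef, hcond, Bool.false_or, hio, if_true, if_false,
              Bool.false_eq_true]
            obtain ⟨suf, hsuf⟩ := ih n (i + 1) (acc ++ [(nm, s, i - 1)]) none
            exact ⟨(nm, s, i - 1) :: suf, by rw [hsuf]; simp⟩
          | false =>
            simp only [ffrLoopA, hdef, hcond, Bool.false_or, hio, if_false,
              Bool.false_eq_true, ite_self]
            exact ih n (i + 1) acc (some (nm, s))

lemma cont_shape (ls : List String) : ∀ (i : Int) (acc : List (String × Int × Int)) (nm : String) (s : Int),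
    ∃ e tail, pvFinish (i + ls.length) (ffrLoopA acc (some (nm, s)) i ls) = acc ++ (nm, s, e) :: tail ∧ i - 1 ≤ e := by
  induction ls with
  | nil =>
    intro i acc nm s
    exact ⟨i - 1, [], by simp [ffrLoopA, pvFinish], by omega⟩
  | cons line rest ih =>
    intro i acc nm s
    have hn : i + ((line :: rest).length : Int) = (i + 1) + (rest.length : Int) := by
      simp only [List.length_cons]
      push_cast
      ring
    rw [hn]
    cases hdef : PySem.Str.startswith line "def " with
    | true =>
      simp only [ffrLoopA, hdef, if_true]
      obtain ⟨suf, hsuf⟩ := loop_appends rest ((i + 1) + (rest.length : Int)) (i + 1)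
        (acc ++ [(nm, s, i - 1)]) (some (pvExtractName line, i))
      exact ⟨i - 1, suf, by rw [hsuf]; simp, by omega⟩
    | false =>
      cases hterm : (PySem.Str.startswith line "class " || PySem.Str.startswith line "#---") with
      | true =>
        have hhead : ∃ c u, line.toList = c :: u ∧ PySem.Chars.isspace c = false := by
          rcases Bool.or_eq_true_iff.mp hterm with h1 | h1
          · obtain ⟨u, hu⟩ := head_of_startswith line "class " 'c' "lass ".toList rfl h1
            exact ⟨'c', u, hu, by decide⟩
          · obtain ⟨u, hu⟩ := head_of_startswith line "#---" '#' "---".toList rfl h1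
            exact ⟨'#', u, hu, by decide⟩
        obtain ⟨c, u, hcu, hcsp⟩ := hhead
        obtain ⟨hne, hget, hstrip⟩ := cond_parts line c u hcu hcsp
        by_cases hnm : nm = ""
        · have hcond : ((nm != "") && (line != "")
              && !((PySem.Str.pyGet? line 0).getD ' ' |> PySem.Chars.isspace)
              && (PySem.Str.strip line != "")) = false := by
            subst hnm
            simp
          simp only [ffrLoopA, hdef, hcond, if_false, Bool.false_eq_true]
          obtain ⟨e, tail, hsh, he⟩ := ih (i + 1) acc nm s
          exact ⟨e, tail, hsh, by omega⟩
        · have hcond : ((nm != "") && (line != "")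
              && !((PySem.Str.pyGet? line 0).getD ' ' |> PySem.Chars.isspace)
              && (PySem.Str.strip line != "")) = true := by
            simp only [hne, hget, Option.getD_some, hcsp, Bool.not_false, hstrip,
              Bool.and_true]
            exact bne_iff_ne.mpr hnm
          simp only [ffrLoopA, hdef, hcond, Bool.false_or, hterm, if_true, if_false,
            Bool.false_eq_true]
          obtain ⟨suf, hsuf⟩ := loop_appends rest ((i + 1) + (rest.length : Int)) (i + 1)
            (acc ++ [(nm, s, i - 1)]) none
          exact ⟨i - 1, suf, by rw [hsuf]; simp, by omega⟩
      | false =>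
        have hstep : ffrLoopA acc (some (nm, s)) i (line :: rest)
            = ffrLoopA acc (some (nm, s)) (i + 1) rest := by
          simp only [ffrLoopA, hdef, Bool.false_or, hterm, if_false, Bool.false_eq_true,
            ite_self]
        rw [hstep]
        obtain ⟨e, tail, hsh, he⟩ := ih (i + 1) acc nm s
        exact ⟨e, tail, hsh, by omega⟩

lemma bad_loop (ls : List String) : ∀ (i : Int) (acc : List (String × Int × Int)) (cur : Option (String × Int)),
    pvBadHyp cur ls →
    pvFinish (i + ls.length) (ffrLoopA acc cur i ls) ≠ acc ++ pvPairAux cur (i + ls.length) (ffrBounds i ls) := by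
  induction ls with
  | nil =>
    intro i acc cur hB
    cases cur with
    | none => simp [pvBadHyp, ffrHasBad] at hB
    | some p => simp [pvBadHyp, ffrHasBad, ffrTermBeforeDef] at hB
  | cons line rest ih =>
    intro i acc cur hB
    have hn : i + ((line :: rest).length : Int) = (i + 1) + (rest.length : Int) := by
      simp only [List.length_cons]
      push_cast
      ring
    rw [hn]
    cases hdef : PySem.Str.startswith line "def " with
    | true =>
      have hnotterm := not_term_of_def line hdef
      have hBdis : (ffrEmptyDef line = true ∧ ffrTermBeforeDef rest = true) ∨ ffrHasBad rest = true := by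
        cases cur with
        | none =>
          simp only [pvBadHyp, Option.elim, ffrHasBad, Bool.or_eq_true, Bool.and_eq_true] at hB
          exact hB
        | some p =>
          rcases hB with hB | ⟨_, hT⟩
          · simp only [ffrHasBad, Bool.or_eq_true, Bool.and_eq_true] at hB
            exact hB
          · rw [ffrTermBeforeDef, hnotterm, hdef] at hT
            simp at hT
      have newB : pvBadHyp (some (pvExtractName line, i)) rest := by
        rcases hBdis with ⟨he, ht⟩ | h1
        · simp only [ffrEmptyDef, Bool.and_eq_true, beq_iff_eq] at he
          exact Or.inr ⟨he.2, ht⟩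
        · exact Or.inl h1
      cases cur with
      | none =>
        simpa only [ffrLoopA, hdef, if_true, ffrBounds, pvPairAux, ffrPair_cons_some]
          using ih (i + 1) acc (some (pvExtractName line, i)) newB
      | some p =>
        rcases p with ⟨nm, s⟩
        simpa only [ffrLoopA, hdef, if_true, ffrBounds, pvPairAux, ffrPair_cons_some, pvEndOf,
          List.append_assoc, List.cons_append, List.nil_append]
          using ih (i + 1) (acc ++ [(nm, s, i - 1)]) (some (pvExtractName line, i)) newB
    | false =>
      have hempty : ffrEmptyDef line = false := by
        simp only [ffrEmptyDef, hdef, Bool.false_and]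
      cases hterm : (PySem.Str.startswith line "class " || PySem.Str.startswith line "#---") with
      | true =>
        have hhead : ∃ c u, line.toList = c :: u ∧ PySem.Chars.isspace c = false := by
          rcases Bool.or_eq_true_iff.mp hterm with h1 | h1
          · obtain ⟨u, hu⟩ := head_of_startswith line "class " 'c' "lass ".toList rfl h1
            exact ⟨'c', u, hu, by decide⟩
          · obtain ⟨u, hu⟩ := head_of_startswith line "#---" '#' "---".toList rfl h1
            exact ⟨'#', u, hu, by decide⟩
        obtain ⟨c, u, hcu, hcsp⟩ := hhead
        obtain ⟨hne, hget, hstrip⟩ := cond_parts line c u hcu hcsp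
        cases cur with
        | none =>
          have hBrest : ffrHasBad rest = true := by
            simp only [pvBadHyp, Option.elim, ffrHasBad, hempty, Bool.false_and,
              Bool.false_or] at hB
            exact hB
          simpa only [ffrLoopA, hdef, if_false, Bool.false_eq_true, ffrBounds, hterm,
            if_true, pvPairAux, ffrPair] using ih (i + 1) acc none hBrest
        | some p =>
          rcases p with ⟨nm, s⟩
          by_cases hnm : nm = ""
          · -- the divergence point: A keeps the empty-named function open, B closes it at i - 1
            subst hnm
            have hcond : (("" != "") && (line != "")
                && !((PySem.Str.pyGet? line 0).getD ' ' |> PySem.Chars.isspace)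
                && (PySem.Str.strip line != "")) = false := by simp
            simp only [ffrLoopA, hdef, hcond, if_false, Bool.false_eq_true, ffrBounds,
              hterm, if_true, pvPairAux, ffrPair, pvEndOf]
            obtain ⟨e, tail, hsh, he⟩ := cont_shape rest (i + 1) acc "" s
            rw [hsh]
            intro heq
            have h2 := List.append_cancel_left heq
            simp only [List.cons.injEq, Prod.mk.injEq] at h2
            have h3 := h2.1.2.2
            omega
          · have hBrest : ffrHasBad rest = true := by
              rcases hB with hB | ⟨h1, _⟩
              · simp only [ffrHasBad, hempty, Bool.false_and, Bool.false_or] at hB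
                exact hB
              · exact absurd h1 hnm
            have hcond : ((nm != "") && (line != "")
                && !((PySem.Str.pyGet? line 0).getD ' ' |> PySem.Chars.isspace)
                && (PySem.Str.strip line != "")) = true := by
              simp only [hne, hget, Option.getD_some, hcsp, Bool.not_false, hstrip,
                Bool.and_true]
              exact bne_iff_ne.mpr hnm
            simpa only [ffrLoopA, hdef, hcond, Bool.false_or, hterm, if_true, if_false,
              Bool.false_eq_true, ffrBounds, pvPairAux, ffrPair, pvEndOf, List.append_assoc,
              List.cons_append, List.nil_append]
              using ih (i + 1) (acc ++ [(nm, s, i - 1)]) none hBrest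
      | false =>
        have htbd : ffrTermBeforeDef (line :: rest) = ffrTermBeforeDef rest := by
          rw [ffrTermBeforeDef, hterm, hdef]
          simp
        have hb : ffrBounds i (line :: rest) = ffrBounds (i + 1) rest := by
          rw [ffrBounds, hdef, hterm]
          simp
        rw [hb]
        cases cur with
        | none =>
          have hBrest : ffrHasBad rest = true := by
            simp only [pvBadHyp, Option.elim, ffrHasBad, hempty, Bool.false_and,
              Bool.false_or] at hB
            exact hB
          simp only [ffrLoopA, hdef, if_false, Bool.false_eq_true]
          exact ih (i + 1) acc none hBrest
        | some p =>
          rcases p with ⟨nm, s⟩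
          have hstep : ffrLoopA acc (some (nm, s)) i (line :: rest)
              = ffrLoopA acc (some (nm, s)) (i + 1) rest := by
            simp only [ffrLoopA, hdef, Bool.false_or, hterm, if_false, Bool.false_eq_true,
              ite_self]
          rw [hstep]
          have newB : pvBadHyp (some (nm, s)) rest := by
            rcases hB with hB | ⟨h1, h2⟩
            · refine Or.inl ?_
              simp only [ffrHasBad, hempty, Bool.false_and, Bool.false_or] at hB
              exact hB
            · exact Or.inr ⟨h1, htbd ▸ h2⟩
          exact ih (i + 1) acc (some (nm, s)) newB

-- ===== VERDICT (by name: the statement is the Claim_ definition above) =====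
theorem find_function_ranges_spec : Claim_unchanged_find_function_ranges := by
  intro lines _ hD
  have h := main_loop lines 0 [] none (by
      simpa [D_find_function_ranges] using hD) trivial
  rcases heq : ffrLoopA [] none 0 lines with ⟨fl, c⟩
  rw [heq] at h
  unfold find_function_ranges find_function_ranges_alt
  rw [heq]
  cases c with
  | none => simpa [pvFinish, pvPairAux, PySem.List.len] using h
  | some p =>
    rcases p with ⟨nm, s⟩
    simpa [pvFinish, pvPairAux, PySem.List.len] using h

theorem find_function_ranges_changed : Claim_changed_find_function_ranges := by
  unfold Claim_changed_find_function_ranges; decide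

theorem find_function_ranges_tight : Claim_exact_find_function_ranges := by
  intro lines _ hD
  have h := bad_loop lines 0 [] none (by
      unfold D_find_function_ranges at hD
      exact hD)
  rcases heq : ffrLoopA [] none 0 lines with ⟨fl, c⟩
  rw [heq] at h
  unfold find_function_ranges find_function_ranges_alt
  rw [heq]
  cases c with
  | none => simpa [pvFinish, pvPairAux, PySem.List.len] using h
  | some p =>
    rcases p with ⟨nm, s⟩
    simpa [pvFinish, pvPairAux, PySem.List.len] using h
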